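-- pv_equiv track=rewrite | github.com/nihui/unofficial-mips-loongson-intrinsics-guide | main.py | collect_logical_define_lines
-- ===== SOURCE A (Python) =====
-- def collect_logical_define_lines(text: str) -> list[tuple[int, str]]:
--     lines = text.splitlines()
--     result: list[tuple[int, str]] = []
--     i = 0
--     while i < len(lines):
--         line = lines[i]
--         if not line.startswith("#define "):
--             i += 1
--             continue
--
--         start = i + 1
--         parts = [line.rstrip("\\").strip()]
--         while line.rstrip().endswith("\\") and i + 1 < len(lines):
--             i += 1
--             line = lines[i]
--             parts.append(line.rstrip("\\").strip())
--         result.append((start, " ".join(part for part in parts if part)))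
--         i += 1
--     return result
-- ===== SOURCE B (Python) =====
-- def collect_logical_define_lines(text: str) -> list[tuple[int, str]]:
--     result: list[tuple[int, str]] = []
--     in_continuation = False
--     start = 0
--     parts: list[str] = []
--     for idx, line in enumerate(text.splitlines()):
--         if in_continuation:
--             parts.append(line.rstrip("\\").strip())
--             if not line.rstrip().endswith("\\"):
--                 result.append((start, " ".join(p for p in parts if p)))
--                 in_continuation = False
--         elif line.startswith("#define "):
--             start = idx + 1
--             parts = [line.rstrip("\\").strip()]
--             if line.rstrip().endswith("\\"):
--                 in_continuation = True
--             else: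
--                 result.append((start, " ".join(p for p in parts if p)))
--     if in_continuation:
--         result.append((start, " ".join(p for p in parts if p)))
--     return result
-- ===== Notes on version B (the rewrite author's own statement) =====
-- stated objective: simpler
-- what changed: A's nested while-loops (an inner loop that gobbles continuation lines while doing manual index bookkeeping) are replaced by a single for-loop over enumerate(lines) carrying an explicit in_continuation/start/parts state with one final flush after the loop.
import Mathlib
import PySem

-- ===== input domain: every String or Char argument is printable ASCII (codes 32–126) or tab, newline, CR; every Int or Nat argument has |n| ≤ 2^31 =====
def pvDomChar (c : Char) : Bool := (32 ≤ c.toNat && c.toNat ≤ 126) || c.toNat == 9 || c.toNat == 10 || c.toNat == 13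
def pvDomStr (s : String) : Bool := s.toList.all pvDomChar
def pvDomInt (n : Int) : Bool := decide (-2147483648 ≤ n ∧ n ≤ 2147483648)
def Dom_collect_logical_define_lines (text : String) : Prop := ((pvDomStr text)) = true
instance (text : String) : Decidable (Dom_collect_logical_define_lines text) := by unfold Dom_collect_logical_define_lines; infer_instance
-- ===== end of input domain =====

-- B replaces A's nested while-loops (inner loop gobbling continuation lines, index bookkeeping)
-- by a single fold over enumerate(lines) carrying an explicit in_continuation/start/parts state
-- with a final flush; objective: simpler single-pass decomposition (same O(n) cost).

-- ===== PORT A =====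
-- shared helpers: the literal sub-expressions both Python versions contain
-- exact port of s.rstrip("\\"): drops exactly the maximal trailing run of '\' characters
def pvRstripBS (s : String) : String := String.ofList ((s.toList.reverse.dropWhile (fun c => c == '\\')).reverse)
-- line.rstrip("\\").strip()
def pvPart (s : String) : String := PySem.Str.strip (pvRstripBS s)
-- line.rstrip().endswith("\\")
def pvCont (s : String) : Bool := PySem.Str.endswith (PySem.Str.rstrip s) "\\"
-- " ".join(part for part in parts if part)
def pvJoin (parts : List String) : String := PySem.Str.join " " (parts.filter (fun p => p != ""))

-- A's inner while: consumes continuation lines, returns (appended parts, remaining lines)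
def pvInnerA : String → List String → List String × List String
  | line, rest =>
    if pvCont line then
      match rest with
      | [] => ([], [])
      | l :: rs =>
        let pr := pvInnerA l rs
        (pvPart l :: pr.1, pr.2)
    else ([], rest)

theorem pvInnerA_snd_length : ∀ (rest : List String) (line : String), (pvInnerA line rest).2.length ≤ rest.length := by
  intro rest
  induction rest with
  | nil => intro line; unfold pvInnerA; split <;> simp
  | cons l rs ih =>
    intro line; unfold pvInnerA
    split
    · exact Nat.le_succ_of_le (ih l)
    · simp

-- A's outer while over the remaining lines, i = current 0-based index
def pvOuterA : List String → Int → List (Int × String)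
  | [], _ => []
  | l :: rest, i =>
    if PySem.Str.startswith l "#define " then
      let pr := pvInnerA l rest
      (i + 1, pvJoin (pvPart l :: pr.1)) :: pvOuterA pr.2 (i + 1 + pr.1.length)
    else pvOuterA rest (i + 1)
termination_by ls _ => ls.length
decreasing_by
  · exact Nat.lt_succ_of_le (pvInnerA_snd_length rest l)
  · simp

def collect_logical_define_lines (text : String) : List (Int × String) :=
  pvOuterA (PySem.Str.splitlines text) 0

-- ===== PORT B =====
-- fold state: (result, in_continuation, start, parts)
def pvStepB : List (Int × String) × Bool × Int × List String → Int × String →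
    List (Int × String) × Bool × Int × List String
  | (res, inCont, start, parts), p =>
    if inCont then
      let parts' := parts ++ [pvPart p.2]
      if pvCont p.2 then (res, true, start, parts')
      else (res ++ [(start, pvJoin parts')], false, start, parts')
    else if PySem.Str.startswith p.2 "#define " then
      let parts' := [pvPart p.2]
      if pvCont p.2 then (res, true, p.1 + 1, parts')
      else (res ++ [(p.1 + 1, pvJoin parts')], false, p.1 + 1, parts')
    else (res, false, start, parts)

-- the flush after the loop
def pvFinishB (st : List (Int × String) × Bool × Int × List String) : List (Int × String) :=
  if st.2.1 then st.1 ++ [(st.2.2.1, pvJoin st.2.2.2)] else st.1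

def collect_logical_define_lines_alt (text : String) : List (Int × String) :=
  pvFinishB ((PySem.List.enumerate (PySem.Str.splitlines text) 0).foldl pvStepB ([], false, 0, []))

-- ===== PRECONDITION & SPEC =====
def Spec_collect_logical_define_lines (text : String) (out : List (Int × String)) : Prop := out = collect_logical_define_lines_alt text
instance (text : String) (out : List (Int × String)) : Decidable (Spec_collect_logical_define_lines text out) := by unfold Spec_collect_logical_define_lines; infer_instance

-- ===== CLAIM (what is proved, stated in full; the proofs are below) =====
def Claim_equal_collect_logical_define_lines : Prop := ∀ (text : String), Dom_collect_logical_define_lines text → Spec_collect_logical_define_lines text (collect_logical_define_lines text)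

-- ===== LEMMAS AND PROOFS =====

-- proof-only helper: the continuation run pvInnerA performs once it is known to be entered
def pvInnerC : List String → List String × List String
  | [] => ([], [])
  | l :: rs =>
    if pvCont l then
      let pr := pvInnerC rs
      (pvPart l :: pr.1, pr.2)
    else ([pvPart l], rs)

theorem pvInnerA_eq (line : String) (rest : List String) :
    pvInnerA line rest = if pvCont line then pvInnerC rest else ([], rest) := by
  by_cases hc : pvCont line = true
  · rw [if_pos hc]
    induction rest generalizing line with
    | nil => unfold pvInnerA pvInnerC; rw [if_pos hc]
    | cons l rs ih =>
      unfold pvInnerA pvInnerC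
      rw [if_pos hc]
      simp only
      by_cases hc2 : pvCont l = true
      · rw [ih l hc2, if_pos hc2]
      · rw [if_neg hc2]
        have : pvInnerA l rs = ([], rs) := by unfold pvInnerA; rw [if_neg hc2]
        rw [this]
  · unfold pvInnerA; rw [if_neg hc, if_neg hc]

-- equation lemmas for pvStepB on explicit states (never unfold pvStepB in a foldl goal)
theorem pvStepB_cont_true (res : List (Int × String)) (s : Int) (parts : List String) (i : Int) (x : String)
    (h : pvCont x = true) :
    pvStepB (res, true, s, parts) (i, x) = (res, true, s, parts ++ [pvPart x]) := by
  simp only [pvStepB, h, if_true]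

theorem pvStepB_cont_false (res : List (Int × String)) (s : Int) (parts : List String) (i : Int) (x : String)
    (h : ¬ pvCont x = true) :
    pvStepB (res, true, s, parts) (i, x) = (res ++ [(s, pvJoin (parts ++ [pvPart x]))], false, s, parts ++ [pvPart x]) := by
  simp only [pvStepB, if_true]
  rw [if_neg h]

theorem pvStepB_def_true (res : List (Int × String)) (s : Int) (parts : List String) (i : Int) (x : String)
    (hd : PySem.Str.startswith x "#define " = true) (h : pvCont x = true) :
    pvStepB (res, false, s, parts) (i, x) = (res, true, i + 1, [pvPart x]) := by
  simp only [pvStepB, hd, h, Bool.false_eq_true, if_false, if_true]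

theorem pvStepB_def_false (res : List (Int × String)) (s : Int) (parts : List String) (i : Int) (x : String)
    (hd : PySem.Str.startswith x "#define " = true) (h : ¬ pvCont x = true) :
    pvStepB (res, false, s, parts) (i, x) = (res ++ [(i + 1, pvJoin [pvPart x])], false, i + 1, [pvPart x]) := by
  simp only [pvStepB, hd, Bool.false_eq_true, if_false, if_true]
  rw [if_neg h]

theorem pvStepB_skip (res : List (Int × String)) (s : Int) (parts : List String) (i : Int) (x : String)
    (hd : ¬ PySem.Str.startswith x "#define " = true) :
    pvStepB (res, false, s, parts) (i, x) = (res, false, s, parts) := by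
  simp only [pvStepB, Bool.false_eq_true, if_false]
  rw [if_neg hd]

theorem pvStepB_prefix (res : List (Int × String)) (q : Bool × Int × List String) (x : Int × String) :
    pvStepB (res, q) x = (res ++ (pvStepB (([] : List (Int × String)), q) x).1, (pvStepB (([] : List (Int × String)), q) x).2) := by
  obtain ⟨b, s, p⟩ := q
  unfold pvStepB
  cases b <;> simp only <;> split_ifs <;> simp

theorem pvFoldB_prefix (l : List (Int × String)) (res : List (Int × String)) (q : Bool × Int × List String) :
    List.foldl pvStepB (res, q) l =
      (res ++ (List.foldl pvStepB (([] : List (Int × String)), q) l).1, (List.foldl pvStepB (([] : List (Int × String)), q) l).2) := by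
  induction l generalizing res q with
  | nil => simp
  | cons x xs ih =>
    simp only [List.foldl_cons]
    rw [pvStepB_prefix res q x]
    obtain ⟨r1, q1⟩ := pvStepB (([] : List (Int × String)), q) x
    rw [ih (res ++ r1) q1, ih r1 q1]
    simp

theorem pvFinishB_prefix (res a : List (Int × String)) (q : Bool × Int × List String) :
    pvFinishB (res ++ a, q) = res ++ pvFinishB (a, q) := by
  obtain ⟨b, s, p⟩ := q
  unfold pvFinishB
  cases b <;> simp

-- the paired invariants, by induction on a length bound
theorem pvMainCont : ∀ (n : Nat),
    (∀ (lines : List String), lines.length ≤ n → ∀ (i s : Int) (parts : List String),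
      pvFinishB (List.foldl pvStepB (([] : List (Int × String)), false, s, parts) (PySem.List.enumerate lines i)) = pvOuterA lines i) ∧
    (∀ (lines : List String), lines.length ≤ n → ∀ (i s : Int) (parts : List String),
      pvFinishB (List.foldl pvStepB (([] : List (Int × String)), true, s, parts) (PySem.List.enumerate lines i)) =
        (s, pvJoin (parts ++ (pvInnerC lines).1)) :: pvOuterA (pvInnerC lines).2 (i + (pvInnerC lines).1.length)) := by
  intro n
  induction n with
  | zero =>
    constructor
    · intro lines h i s parts
      rw [List.length_eq_zero_iff.mp (Nat.le_zero.mp h)]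
      simp [PySem.List.enumerate, pvFinishB, pvOuterA]
    · intro lines h i s parts
      rw [List.length_eq_zero_iff.mp (Nat.le_zero.mp h)]
      simp [PySem.List.enumerate, pvFinishB, pvInnerC, pvOuterA]
  | succ n ih =>
    obtain ⟨ihMain, ihCont⟩ := ih
    constructor
    · -- main invariant
      intro lines h i s parts
      match lines with
      | [] => simp [PySem.List.enumerate, pvFinishB, pvOuterA]
      | l :: rs =>
        have hrs : rs.length ≤ n := Nat.le_of_succ_le_succ h
        rw [PySem.List.enumerate_cons, List.foldl_cons]
        by_cases hd : PySem.Str.startswith l "#define " = true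
        · by_cases hc : pvCont l = true
          · rw [pvStepB_def_true _ _ _ _ _ hd hc, ihCont rs hrs (i+1) (i+1) [pvPart l]]
            conv_rhs => rw [pvOuterA]
            rw [if_pos hd, pvInnerA_eq, if_pos hc, List.singleton_append]
          · rw [pvStepB_def_false _ _ _ _ _ hd hc, pvFoldB_prefix, pvFinishB_prefix,
                ihMain rs hrs (i+1) (i+1) [pvPart l]]
            conv_rhs => rw [pvOuterA]
            rw [if_pos hd, pvInnerA_eq, if_neg hc]
            simp
        · rw [pvStepB_skip _ _ _ _ _ hd, ihMain rs hrs (i+1) s parts]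
          conv_rhs => rw [pvOuterA]
          rw [if_neg hd]
    · -- continuation invariant
      intro lines h i s parts
      match lines with
      | [] => simp [PySem.List.enumerate, pvFinishB, pvInnerC, pvOuterA]
      | l :: rs =>
        have hrs : rs.length ≤ n := Nat.le_of_succ_le_succ h
        rw [PySem.List.enumerate_cons, List.foldl_cons]
        by_cases hc : pvCont l = true
        · rw [pvStepB_cont_true _ _ _ _ _ hc, ihCont rs hrs (i+1) s (parts ++ [pvPart l])]
          conv_rhs => rw [pvInnerC]
          rw [if_pos hc]
          refine congrArg₂ List.cons ?_ ?_
          · rw [List.append_assoc, List.singleton_append]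
          · congr 1
            push_cast [List.length_cons]
            ring
        · rw [pvStepB_cont_false _ _ _ _ _ hc, pvFoldB_prefix, pvFinishB_prefix,
              ihMain rs hrs (i+1) s (parts ++ [pvPart l])]
          conv_rhs => rw [pvInnerC]
          rw [if_neg hc]
          simp

-- ===== VERDICT (by name: the statement is the Claim_ definition above) =====
theorem collect_logical_define_lines_spec : Claim_equal_collect_logical_define_lines := by
  intro text _
  unfold Spec_collect_logical_define_lines collect_logical_define_lines collect_logical_define_lines_alt
  exact ((pvMainCont (PySem.Str.splitlines text).length).1 _ le_rfl 0 0 []).symm
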